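-- pv_equiv track=rewrite | github.com/AdobeDocs/express-add-ons-docs | scripts/generate_detailed_implementation_report.py | get_common_issues_summary
-- ===== SOURCE A (Python) =====
-- def get_common_issues_summary(detailed_data):
--     """Analyze common issues across files."""
--     total_files = len(detailed_data)
--
--     # Count common patterns
--     no_context_clarity = sum(1 for f in detailed_data if f.get('context_clarity_score', 0) == 0)
--     incomplete_examples = sum(f.get('incomplete_examples', 0) for f in detailed_data)
--     no_error_docs = sum(1 for f in detailed_data if f.get('error_sections', 0) == 0)
--     no_qa_format = sum(1 for f in detailed_data if f.get('qa_sections', 0) == 0)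
--     no_cross_refs = sum(1 for f in detailed_data if f.get('cross_references', 0) == 0)
--
--     return {
--         'missing_context': no_context_clarity,
--         'incomplete_examples': incomplete_examples,
--         'missing_error_docs': no_error_docs,
--         'no_qa_format': no_qa_format,
--         'no_cross_refs': no_cross_refs,
--         'total_files': total_files
--     }
-- ===== SOURCE B (Python) =====
-- def get_common_issues_summary(detailed_data):
--     """Analyze common issues across files: divide-and-conquer monoid reduction.
--
--     Each file maps to an issue vector (a dict); the list is split in halves,
--     each half is summarized recursively, and the two summaries are added
--     pointwise.  Correct because every counter is a sum over files, and sums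
--     over a concatenation split into sums over the parts.
--     """
--     KEYS = ('missing_context', 'incomplete_examples', 'missing_error_docs',
--             'no_qa_format', 'no_cross_refs', 'total_files')
--
--     def leaf(f):
--         return {
--             'missing_context': 1 if f.get('context_clarity_score', 0) == 0 else 0,
--             'incomplete_examples': f.get('incomplete_examples', 0),
--             'missing_error_docs': 1 if f.get('error_sections', 0) == 0 else 0,
--             'no_qa_format': 1 if f.get('qa_sections', 0) == 0 else 0,
--             'no_cross_refs': 1 if f.get('cross_references', 0) == 0 else 0,
--             'total_files': 1,
--         }
--
--     def merge(x, y):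
--         return {k: x[k] + y[k] for k in KEYS}
--
--     def summarize(files):
--         if not files:
--             return dict.fromkeys(KEYS, 0)
--         if len(files) == 1:
--             return leaf(files[0])
--         mid = len(files) // 2
--         return merge(summarize(files[:mid]), summarize(files[mid:]))
--
--     return summarize(detailed_data)
-- ===== Notes on version B (the rewrite author's own statement) =====
-- stated objective: alternative
-- what changed: Replaces A's five flat comprehension passes plus len with a recursive divide-and-conquer reduction: each file becomes a per-file issue vector and halves of the list are summarized recursively and merged by pointwise addition.
import Mathlib
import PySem

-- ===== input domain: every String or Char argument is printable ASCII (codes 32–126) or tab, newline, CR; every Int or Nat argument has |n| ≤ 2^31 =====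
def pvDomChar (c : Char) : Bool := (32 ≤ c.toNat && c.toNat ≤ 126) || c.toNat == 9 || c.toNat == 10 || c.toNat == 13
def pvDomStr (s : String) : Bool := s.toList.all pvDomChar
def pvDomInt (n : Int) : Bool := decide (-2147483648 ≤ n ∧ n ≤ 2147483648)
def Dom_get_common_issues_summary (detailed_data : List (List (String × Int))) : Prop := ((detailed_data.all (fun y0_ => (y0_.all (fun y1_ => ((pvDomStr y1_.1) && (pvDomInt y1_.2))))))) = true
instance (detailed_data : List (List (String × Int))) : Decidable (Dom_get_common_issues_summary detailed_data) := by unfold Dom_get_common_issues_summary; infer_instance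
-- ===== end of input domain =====

-- B replaces A's five flat comprehension passes with a divide-and-conquer reduction:
-- per-file issue vectors, halves summarized recursively and merged by pointwise addition;
-- objective: alternative (same cost, different algorithmic structure).

-- f.get(key, 0) on the association-list encoding of the Python dict f
def pvGet0 (f : List (String × Int)) (k : String) : Int :=
  (PySem.Dict.mk f).getD k 0

-- ===== PORT A =====
def get_common_issues_summary (detailed_data : List (List (String × Int))) : List (String × Int) :=
  let total_files : Int := detailed_data.length
  let no_context_clarity : Int :=
    detailed_data.foldl (fun s f => s + (if pvGet0 f "context_clarity_score" = 0 then 1 else 0)) 0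
  let incomplete_examples : Int :=
    detailed_data.foldl (fun s f => s + pvGet0 f "incomplete_examples") 0
  let no_error_docs : Int :=
    detailed_data.foldl (fun s f => s + (if pvGet0 f "error_sections" = 0 then 1 else 0)) 0
  let no_qa_format : Int :=
    detailed_data.foldl (fun s f => s + (if pvGet0 f "qa_sections" = 0 then 1 else 0)) 0
  let no_cross_refs : Int :=
    detailed_data.foldl (fun s f => s + (if pvGet0 f "cross_references" = 0 then 1 else 0)) 0
  [("missing_context", no_context_clarity),
   ("incomplete_examples", incomplete_examples),
   ("missing_error_docs", no_error_docs),
   ("no_qa_format", no_qa_format),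
   ("no_cross_refs", no_cross_refs),
   ("total_files", total_files)]

-- ===== PORT B =====
-- the fixed key tuple KEYS of Source B
def pvKeys : List String :=
  ["missing_context", "incomplete_examples", "missing_error_docs",
   "no_qa_format", "no_cross_refs", "total_files"]

-- leaf(f): the issue vector of one file (a dict with the six fixed keys)
def pvLeaf (f : List (String × Int)) : List (String × Int) :=
  [("missing_context", if pvGet0 f "context_clarity_score" = 0 then 1 else 0),
   ("incomplete_examples", pvGet0 f "incomplete_examples"),
   ("missing_error_docs", if pvGet0 f "error_sections" = 0 then 1 else 0),
   ("no_qa_format", if pvGet0 f "qa_sections" = 0 then 1 else 0),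
   ("no_cross_refs", if pvGet0 f "cross_references" = 0 then 1 else 0),
   ("total_files", 1)]

-- merge(x, y): {k: x[k] + y[k] for k in KEYS}; x[k]/y[k] always succeed here
-- (the six keys are present in every vector), so the total lookup is exact.
def pvMerge (x y : List (String × Int)) : List (String × Int) :=
  pvKeys.map (fun k => (k, pvGet0 x k + pvGet0 y k))

-- summarize(files): split at the midpoint, recurse, merge
def pvSummarize (l : List (List (String × Int))) : List (String × Int) :=
  match l with
  | [] => pvKeys.map (fun k => (k, 0))        -- dict.fromkeys(KEYS, 0)
  | [f] => pvLeaf f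
  | f :: g :: rest =>
      let mid := (f :: g :: rest).length / 2
      pvMerge (pvSummarize ((f :: g :: rest).take mid))
              (pvSummarize ((f :: g :: rest).drop mid))
termination_by l.length
decreasing_by
  · simp [List.length_take]; omega
  · simp [List.length_drop]; omega

def get_common_issues_summary_alt (detailed_data : List (List (String × Int))) : List (String × Int) :=
  pvSummarize detailed_data

-- ===== PRECONDITION & SPEC =====
def Spec_get_common_issues_summary (detailed_data : List (List (String × Int))) (out : List (String × Int)) : Prop := out = get_common_issues_summary_alt detailed_data
instance (detailed_data : List (List (String × Int))) (out : List (String × Int)) : Decidable (Spec_get_common_issues_summary detailed_data out) := by unfold Spec_get_common_issues_summary; infer_instance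

-- ===== CLAIM (what is proved, stated in full; the proofs are below) =====
def Claim_equal_get_common_issues_summary : Prop := ∀ (detailed_data : List (List (String × Int))), Dom_get_common_issues_summary detailed_data → Spec_get_common_issues_summary detailed_data (get_common_issues_summary detailed_data)

-- ===== LEMMAS AND PROOFS =====

-- the six counters A computes, as one list-valued function
def pvVec (l : List (List (String × Int))) : List (String × Int) :=
  [("missing_context", l.foldl (fun s f => s + (if pvGet0 f "context_clarity_score" = 0 then 1 else 0)) 0),
   ("incomplete_examples", l.foldl (fun s f => s + pvGet0 f "incomplete_examples") 0),
   ("missing_error_docs", l.foldl (fun s f => s + (if pvGet0 f "error_sections" = 0 then 1 else 0)) 0),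
   ("no_qa_format", l.foldl (fun s f => s + (if pvGet0 f "qa_sections" = 0 then 1 else 0)) 0),
   ("no_cross_refs", l.foldl (fun s f => s + (if pvGet0 f "cross_references" = 0 then 1 else 0)) 0),
   ("total_files", (l.length : Int))]

-- an additive fold splits over ++ (via PySem.List.foldl_add and map/sum over ++)
theorem pv_foldl_add_append (g : List (String × Int) → Int) (a b : List (List (String × Int))) :
    (a ++ b).foldl (fun s f => s + g f) 0 =
      a.foldl (fun s f => s + g f) 0 + b.foldl (fun s f => s + g f) 0 := by
  simp only [PySem.List.foldl_add, List.map_append, List.sum_append]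
  ring

-- pvVec is a monoid homomorphism: merging the vectors of two halves gives the vector of the whole
theorem pv_merge_vec (a b : List (List (String × Int))) :
    pvMerge (pvVec a) (pvVec b) = pvVec (a ++ b) := by
  simp only [pvVec, pv_foldl_add_append, List.length_append, pvMerge, pvKeys,
    List.map_cons, List.map_nil]
  norm_num [pvGet0, PySem.Dict.getD, PySem.Dict.get?, List.find?]
  simp

-- summarize computes pvVec
theorem pvSummarize_eq (l : List (List (String × Int))) : pvSummarize l = pvVec l := by
  induction l using pvSummarize.induct with
  | case1 => simp [pvSummarize, pvVec, pvKeys]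
  | case2 f => simp [pvSummarize, pvVec, pvLeaf]
  | case3 f g rest mid ih1 ih2 =>
      rw [pvSummarize, ih1, ih2, pv_merge_vec, List.take_append_drop]

-- ===== VERDICT (by name: the statement is the Claim_ definition above) =====
theorem get_common_issues_summary_spec : Claim_equal_get_common_issues_summary := by
  intro detailed_data _
  unfold Spec_get_common_issues_summary get_common_issues_summary get_common_issues_summary_alt
  rw [pvSummarize_eq]
  rfl
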